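-- pv_equiv track=rewrite | github.com/Jazz-hash/HU-DSA-Project | app/server.py | convertEncryptedToWords
-- ===== SOURCE A (Python) =====
-- def checkDecryption(keyLessWords):
--     keyError = True
--     for word, level in keyLessWords:
--         if level == 1:
--             keyError = False
--     return keyError
--
-- def convertEncryptedToWords(encrypted):
--     if checkDecryption(encrypted):
--         return None
--     words = []
--     for word, level in encrypted:
--         if level == 1:
--             word = "".join([str(chr(int(word[i:i+3]))) for i in range(0, len(word), 3)])
--         words.append(word)
--     return words
-- ===== SOURCE B (Python) =====
-- def convertEncryptedToWords(encrypted):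
--     found_level1 = False
--     words = []
--     for word, level in encrypted:
--         if level == 1:
--             found_level1 = True
--             decoded = []
--             rest = word
--             while rest:
--                 decoded.append(chr(int(rest[:3])))
--                 rest = rest[3:]
--             words.append("".join(decoded))
--         else:
--             words.append(word)
--     return words if found_level1 else None
-- ===== Notes on version B (the rewrite author's own statement) =====
-- stated objective: simpler
-- what changed: B folds A's separate full-list existence scan (checkDecryption) into the single decode pass by tracking a found flag, and decodes each level-1 word by repeatedly splitting off the first 3-character chunk instead of indexing with range(0, len(word), 3).
import Mathlib
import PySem

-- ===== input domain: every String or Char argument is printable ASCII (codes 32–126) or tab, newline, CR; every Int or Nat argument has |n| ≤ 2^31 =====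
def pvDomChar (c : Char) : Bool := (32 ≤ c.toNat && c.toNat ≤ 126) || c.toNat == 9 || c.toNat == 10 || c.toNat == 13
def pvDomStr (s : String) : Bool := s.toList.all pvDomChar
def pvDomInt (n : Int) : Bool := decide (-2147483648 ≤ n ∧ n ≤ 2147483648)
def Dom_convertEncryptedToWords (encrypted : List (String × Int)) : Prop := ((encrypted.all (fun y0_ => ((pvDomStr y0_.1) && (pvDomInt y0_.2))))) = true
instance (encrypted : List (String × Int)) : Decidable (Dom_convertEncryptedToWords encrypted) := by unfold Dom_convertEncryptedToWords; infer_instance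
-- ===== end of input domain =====

-- B merges A's separate level-1 existence scan into the single decode pass (objective: simpler); return values only.

-- ===== PORT A =====
-- chr(int(chunk)): exact under Pre_ (chunk parses to n with 0 ≤ n; chunks have ≤ 3 chars so n ≤ 999,
-- a valid non-surrogate codepoint); the getD 0 default is unreachable under Pre_.
def pyChrInt (cs : List Char) : Char := Char.ofNat ((PySem.Int.ofChars? cs).getD 0).toNat

def checkDecryption (keyLessWords : List (String × Int)) : Bool :=
  keyLessWords.foldl (fun keyError wl => if wl.2 == 1 then false else keyError) true

-- "".join([str(chr(int(word[i:i+3]))) for i in range(0, len(word), 3)]): each piece is a single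
-- char, so the join is String.ofList of the mapped char list (exact).
def decodeWordA (w : List Char) : List Char :=
  (PySem.List.pyRange 0 (w.length : Int) 3).map
    (fun i => pyChrInt (PySem.List.slice w (some i) (some (i + 3))))

def convertEncryptedToWords (encrypted : List (String × Int)) : Option (List String) :=
  if checkDecryption encrypted then none
  else some (encrypted.foldl (fun words wl =>
      words ++ [if wl.2 == 1 then String.ofList (decodeWordA wl.1.toList) else wl.1]) [])

-- ===== PORT B =====
-- B's while loop: split off the first 3-char chunk (rest[:3] / rest[3:]) until empty.
def decodeWordB : List Char → List Char
  | [] => []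
  | c :: rest => pyChrInt ((c :: rest).take 3) :: decodeWordB (rest.drop 2)
  termination_by w => w.length
  decreasing_by simp

def convertEncryptedToWords_alt (encrypted : List (String × Int)) : Option (List String) :=
  let st := encrypted.foldl (fun (st : Bool × List String) wl =>
      if wl.2 == 1 then (true, st.2 ++ [String.ofList (decodeWordB wl.1.toList)])
      else (st.1, st.2 ++ [wl.1])) (false, [])
  if st.1 then some st.2 else none

-- ===== PRECONDITION & SPEC =====
-- Pre_ excludes exactly the inputs where the Python A raises: a level-1 word one of whose
-- 3-character chunks is not int()-parseable or parses negative (int()/chr() ValueError there).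
def chunkOK (cs : List Char) : Bool :=
  match PySem.Int.ofChars? cs with
  | some n => decide (0 ≤ n)
  | none => false

def preChunks : List Char → Bool
  | [] => true
  | [a] => chunkOK [a]
  | [a, b] => chunkOK [a, b]
  | a :: b :: c :: rest => chunkOK [a, b, c] && preChunks rest

def Pre_convertEncryptedToWords (encrypted : List (String × Int)) : Prop :=
  ∀ wl ∈ encrypted, wl.2 = 1 → preChunks wl.1.toList = true

instance (encrypted : List (String × Int)) : Decidable (Pre_convertEncryptedToWords encrypted) := by
  unfold Pre_convertEncryptedToWords; infer_instance

def pvWitness_convertEncryptedToWords : (List (String × Int)) := [("072105", 1), ("abc", 0)]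

def Spec_convertEncryptedToWords (encrypted : List (String × Int)) (out : Option (List String)) : Prop :=
  out = convertEncryptedToWords_alt encrypted

instance (encrypted : List (String × Int)) (out : Option (List String)) :
    Decidable (Spec_convertEncryptedToWords encrypted out) := by
  unfold Spec_convertEncryptedToWords; infer_instance

-- ===== CLAIM =====
def Claim_equal_convertEncryptedToWords : Prop :=
  ∀ (encrypted : List (String × Int)), Dom_convertEncryptedToWords encrypted →
    Pre_convertEncryptedToWords encrypted →
    Spec_convertEncryptedToWords encrypted (convertEncryptedToWords encrypted)

-- ===== LEMMAS AND PROOFS =====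

-- the common chunk-map normal form of both decoders
def chunkMap (w : List Char) : List Char :=
  (List.range ((w.length + 2) / 3)).map (fun k => pyChrInt ((w.drop (3 * k)).take 3))

lemma slice3 (w : List Char) (j : Nat) :
    PySem.List.slice w (some (0 + 3 * (j : Int))) (some (0 + 3 * (j : Int) + 3)) =
      (w.drop (3 * j)).take 3 := by
  have h1 : (0 + 3 * (j : Int)) = ((3 * j : Nat) : Int) := by push_cast; ring
  have h2 : (0 + 3 * (j : Int) + 3) = ((3 * j + 3 : Nat) : Int) := by push_cast; ring
  rw [h2, h1, PySem.List.slice_natCast]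
  congr 1
  omega

lemma decodeA_eq_chunkMap (w : List Char) : decodeWordA w = chunkMap w := by
  unfold decodeWordA chunkMap
  rw [PySem.List.pyRange_of_pos _ _ (by norm_num : (0:Int) < 3)]
  rw [List.map_map]
  by_cases h : 0 < w.length
  · have hif : (if (0:Int) < (w.length : Int) then
        (((w.length : Int) - 0 + 3 - 1) / 3).toNat else 0) = (w.length + 2) / 3 := by
      split <;> omega
    rw [hif]
    apply List.map_congr_left
    intro k _
    simp only [Function.comp]
    rw [slice3]
  · have hw : w.length = 0 := by omega
    have hif : (if (0:Int) < (w.length : Int) then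
        (((w.length : Int) - 0 + 3 - 1) / 3).toNat else 0) = 0 := by split <;> omega
    rw [hif, hw]
    simp

lemma decodeB_eq_chunkMap (w : List Char) : decodeWordB w = chunkMap w := by
  induction w using decodeWordB.induct with
  | case1 => rw [decodeWordB]; simp [chunkMap]
  | case2 c rest ih =>
    rw [decodeWordB, ih]
    unfold chunkMap
    rw [show ((c :: rest).length + 2) / 3 = ((rest.drop 2).length + 2) / 3 + 1 by simp; omega]
    rw [List.range_succ_eq_map, List.map_cons, List.map_map]
    refine congrArg₂ _ (by simp) ?_
    apply List.map_congr_left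
    intro k _
    simp only [Function.comp]
    congr 1
    rw [List.drop_drop]
    rw [show 3 * (k + 1) = 3 * k + 2 + 1 by ring, List.drop_succ_cons]
    rw [show 2 + 3 * k = 3 * k + 2 by ring]

lemma decode_eq (w : List Char) : decodeWordA w = decodeWordB w := by
  rw [decodeA_eq_chunkMap, decodeB_eq_chunkMap]

-- A's words loop is a map
lemma foldA_eq_map (l : List (String × Int)) :
    l.foldl (fun words wl =>
        words ++ [if wl.2 == 1 then String.ofList (decodeWordA wl.1.toList) else wl.1]) [] =
      l.map (fun wl => if wl.2 == 1 then String.ofList (decodeWordA wl.1.toList) else wl.1) := by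
  simpa using PySem.List.foldl_append_singleton_eq_map
    (fun wl => if wl.2 == 1 then String.ofList (decodeWordA wl.1.toList) else wl.1) l []

-- B's paired loop: flag = any level-1, words = mapped list
lemma foldB_eq (l : List (String × Int)) : ∀ (st : Bool × List String),
    l.foldl (fun (st : Bool × List String) wl =>
        if wl.2 == 1 then (true, st.2 ++ [String.ofList (decodeWordB wl.1.toList)])
        else (st.1, st.2 ++ [wl.1])) st =
      (st.1 || l.any (fun wl => wl.2 == 1),
        st.2 ++ l.map (fun wl => if wl.2 == 1 then String.ofList (decodeWordB wl.1.toList) else wl.1)) := by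
  induction l with
  | nil => intro st; simp
  | cons x xs ih =>
    intro st
    simp only [List.foldl_cons, List.any_cons, List.map_cons]
    by_cases hx : x.2 == 1
    · rw [if_pos hx, ih]; simp [hx]
    · rw [if_neg hx, ih]; simp [hx]

-- checkDecryption is "no level-1 entry"
lemma checkD_eq (l : List (String × Int)) : ∀ (b : Bool),
    l.foldl (fun keyError wl => if wl.2 == 1 then false else keyError) b =
      (b && !(l.any (fun wl => wl.2 == 1))) := by
  induction l with
  | nil => intro b; simp
  | cons x xs ih =>
    intro b
    simp only [List.foldl_cons, List.any_cons]
    rw [ih]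
    by_cases hx : x.2 == 1 <;> simp [hx]

-- ===== VERDICT =====
theorem convertEncryptedToWords_spec : Claim_equal_convertEncryptedToWords := by
  intro encrypted _ _
  unfold Spec_convertEncryptedToWords convertEncryptedToWords convertEncryptedToWords_alt checkDecryption
  rw [checkD_eq, foldA_eq_map, foldB_eq]
  have hmap : encrypted.map
      (fun wl => if wl.2 == 1 then String.ofList (decodeWordA wl.1.toList) else wl.1) =
      encrypted.map
      (fun wl => if wl.2 == 1 then String.ofList (decodeWordB wl.1.toList) else wl.1) := by
    apply List.map_congr_left
    intro wl _
    rw [decode_eq]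
  rw [hmap]
  by_cases h : encrypted.any (fun wl => wl.2 == 1) <;> simp [h]
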